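-- pv_equiv track=rewrite | github.com/jakapongh/iccs101 | mastery/mastery_1/better_swpcase.py | better_swap_case
-- ===== SOURCE A (Python) =====
-- VOWELS = "aeiou"
--
-- ALPHABET = "abcdefghijklmnopqrstuvwxyz"
--
-- def is_upper(char: str):
--     """
--     Checks if a character is uppercase
--     """
--     return char.upper() == char
--
-- def better_swap_case(st: str) -> str:
--     # Turn the string into a list of characters so that we
--     # can directly replace a character at a given position
--     # to another character
--     st_list = list(st)
--
--     for idx, char in enumerate(st_list):
--         # We do .lower() on the character for normalisation
--         # because "A" != "a". In this case we don't care about the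
--         # casing therefore we'll just make it lowercase.
--
--         if char.lower() not in ALPHABET:
--             # Characters that aren't in the alphabet (e.g. numbers)
--             # will be replaced with a space
--             char = " "
--         elif char.lower() not in VOWELS:
--             # Characters that aren't vowels
--             # If the character is uppercase, it will be turned into
--             # lowercase and vice versa
--             if is_upper(char):
--                 char = char.lower()
--             else:
--                 char = char.upper()
--
--         # Now that we have performed the necessary actions on the character,
--         # we'll put the changed character back into it's original place
--         st_list[idx] = char
--
--     # Takes all the characters in st_list and join them back together
--     # into a normal string
--     result = "".join(st_list)
--
--     return result
-- ===== SOURCE B (Python) =====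
-- VOWELS = "aeiou"
--
-- ALPHABET = "abcdefghijklmnopqrstuvwxyz"
--
--
-- def better_swap_case(st: str) -> str:
--     # Build a translation table over the distinct characters of the
--     # input, then delegate the rewrite to str.translate.
--     table = {}
--     for c in set(st):
--         if c.lower() not in ALPHABET:
--             table[ord(c)] = " "
--         elif c.lower() in VOWELS:
--             table[ord(c)] = c
--         elif c.upper() == c:
--             table[ord(c)] = c.lower()
--         else:
--             table[ord(c)] = c.upper()
--     return st.translate(table)
-- ===== Notes on version B (the rewrite author's own statement) =====
-- stated objective: idiomatic
-- what changed: Replaced A's per-index mutate loop over a character list with building a translation table over the distinct characters and delegating the rewrite to a single str.translate call.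
import Mathlib
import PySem

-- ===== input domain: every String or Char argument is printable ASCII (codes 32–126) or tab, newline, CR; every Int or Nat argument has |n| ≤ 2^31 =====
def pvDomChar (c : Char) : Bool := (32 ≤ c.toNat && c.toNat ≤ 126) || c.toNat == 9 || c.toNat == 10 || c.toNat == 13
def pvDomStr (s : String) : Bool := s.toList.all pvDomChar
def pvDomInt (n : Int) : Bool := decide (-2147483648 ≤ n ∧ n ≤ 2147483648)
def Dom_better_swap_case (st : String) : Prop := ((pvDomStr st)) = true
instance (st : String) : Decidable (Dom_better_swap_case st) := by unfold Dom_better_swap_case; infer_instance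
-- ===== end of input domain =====

-- B builds a translation table over the distinct characters and applies it in one pass (idiomatic str.translate style), instead of A's per-index mutate loop.


-- ===== PORT A =====
def VOWELS : List Char := "aeiou".toList

def ALPHABET : List Char := "abcdefghijklmnopqrstuvwxyz".toList

-- is_upper(char): char.upper() == char, on a one-character string
def is_upper (char : Char) : Bool := PySem.Chars.upperChar char == char

def better_swap_case (st : String) : String :=
  let st_list := st.toList
  let st_list :=
    (PySem.List.enumerate st_list 0).foldl
      (fun acc ic =>
        let char := ic.2
        let char :=
          if !(PySem.Chars.isIn [PySem.Chars.lowerChar char] ALPHABET) then ' '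
          else if !(PySem.Chars.isIn [PySem.Chars.lowerChar char] VOWELS) then
            (if is_upper char then PySem.Chars.lowerChar char else PySem.Chars.upperChar char)
          else char
        PySem.List.pySetD acc ic.1 char)
      st_list
  String.ofList st_list

-- ===== PORT B =====
-- B keys the table by the character itself (Python's ord(c) is a bijection on code points)
def bswapRepl (c : Char) : Char :=
  if !(PySem.Chars.isIn [PySem.Chars.lowerChar c] ALPHABET) then ' '
  else if PySem.Chars.isIn [PySem.Chars.lowerChar c] VOWELS then c
  else if PySem.Chars.upperChar c == c then PySem.Chars.lowerChar c
  else PySem.Chars.upperChar c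

def better_swap_case_alt (st : String) : String :=
  let table := (PySem.Set.ofList st.toList).foldl
    (fun d c => d.insert c (bswapRepl c)) PySem.Dict.empty
  String.ofList (st.toList.map (fun c => table.getD c c))

-- ===== PRECONDITION & SPEC =====
def Spec_better_swap_case (st : String) (out : String) : Prop := out = better_swap_case_alt st
instance (st : String) (out : String) : Decidable (Spec_better_swap_case st out) := by unfold Spec_better_swap_case; infer_instance

-- ===== CLAIM (what is proved, stated in full; the proofs are below) =====
def Claim_equal_better_swap_case : Prop := ∀ (st : String), Dom_better_swap_case st → Spec_better_swap_case st (better_swap_case st)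

-- ===== LEMMAS AND PROOFS =====

-- A's loop: writing f(xs[i]) at position i for every i is List.map f
theorem foldl_setD_enumerate (f : Char → Char) :
    ∀ (ys pre : List Char),
      (PySem.List.enumerate ys (pre.length : Int)).foldl
        (fun acc ic => PySem.List.pySetD acc ic.1 (f ic.2)) (pre ++ ys)
      = pre ++ ys.map f := by
  intro ys
  induction ys with
  | nil => intro pre; simp [PySem.List.enumerate_nil]
  | cons y ys ih =>
    intro pre
    rw [PySem.List.enumerate_cons]
    simp only [List.foldl_cons]
    have hset : PySem.List.pySetD (pre ++ y :: ys) (pre.length : Int) (f y)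
        = (pre ++ [f y]) ++ ys := by
      rw [PySem.List.pySetD_natCast]
      simp
    rw [hset]
    have hlen : ((pre.length : Int) + 1) = (((pre ++ [f y]).length : Nat) : Int) := by
      simp
    rw [hlen, ih (pre ++ [f y])]
    simp

-- B's table lookup returns bswapRepl c for every character of the string
theorem table_getD (xs : List Char) (c : Char) (hc : c ∈ xs) :
    ((PySem.Set.ofList xs).foldl (fun d c => d.insert c (bswapRepl c))
        (PySem.Dict.empty : PySem.Dict Char Char)).getD c c = bswapRepl c := by
  have hfun : (fun (d : PySem.Dict Char Char) (c : Char) => d.insert c (bswapRepl c))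
      = (fun d a => d.insert (id a) (bswapRepl a)) := rfl
  apply PySem.Dict.getD_of_mem_items
  · rw [hfun, PySem.Dict.items_foldl_insert_fresh]
    · simp [PySem.Set.mem_ofList, hc]
    · intro a _; exact PySem.Dict.contains_empty a
    · simp [PySem.Set.nodup_ofList xs]
  · exact PySem.Dict.nodup_keys_foldl_insert _ _ _ (by simp)

-- the two per-character decisions agree
theorem repl_agree (c : Char) :
    (if !(PySem.Chars.isIn [PySem.Chars.lowerChar c] ALPHABET) then ' '
     else if !(PySem.Chars.isIn [PySem.Chars.lowerChar c] VOWELS) then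
       (if is_upper c then PySem.Chars.lowerChar c else PySem.Chars.upperChar c)
     else c) = bswapRepl c := by
  unfold bswapRepl is_upper
  cases ha : PySem.Chars.isIn [PySem.Chars.lowerChar c] ALPHABET <;>
    cases hv : PySem.Chars.isIn [PySem.Chars.lowerChar c] VOWELS <;> simp

-- ===== VERDICT (by name: the statement is the Claim_ definition above) =====
theorem better_swap_case_spec : Claim_equal_better_swap_case := by
  intro st _
  unfold Spec_better_swap_case better_swap_case better_swap_case_alt
  simp only []
  have hA := foldl_setD_enumerate
    (fun c =>
      if !(PySem.Chars.isIn [PySem.Chars.lowerChar c] ALPHABET) then ' '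
      else if !(PySem.Chars.isIn [PySem.Chars.lowerChar c] VOWELS) then
        (if is_upper c then PySem.Chars.lowerChar c else PySem.Chars.upperChar c)
      else c) st.toList []
  simp only [List.nil_append, List.length_nil, Int.natCast_zero] at hA
  rw [hA]
  congr 1
  apply List.map_congr_left
  intro c hc
  rw [table_getD st.toList c hc, ← repl_agree c]
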